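-- pv_equiv track=rewrite | github.com/maysaraadmin/khatma-app | import_quran_verses_to_parts.py | get_juz_for_ayah
-- ===== SOURCE A (Python) =====
-- JUZ_BOUNDARIES = [
--     (1, 1),      # Juz 1 starts at Surah 1, Ayah 1
--     (2, 142),    # Juz 2 starts at Surah 2, Ayah 142
--     (2, 253),    # Juz 3 starts at Surah 2, Ayah 253
--     (3, 92),     # Juz 4 starts at Surah 3, Ayah 92
--     (4, 24),     # Juz 5 starts at Surah 4, Ayah 24
--     (4, 148),    # Juz 6 starts at Surah 4, Ayah 148
--     (5, 82),     # Juz 7 starts at Surah 5, Ayah 82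
--     (6, 111),    # Juz 8 starts at Surah 6, Ayah 111
--     (7, 88),     # Juz 9 starts at Surah 7, Ayah 88
--     (8, 41),     # Juz 10 starts at Surah 8, Ayah 41
--     (9, 93),     # Juz 11 starts at Surah 9, Ayah 93
--     (11, 6),     # Juz 12 starts at Surah 11, Ayah 6
--     (12, 53),    # Juz 13 starts at Surah 12, Ayah 53
--     (15, 1),     # Juz 14 starts at Surah 15, Ayah 1
--     (17, 1),     # Juz 15 starts at Surah 17, Ayah 1
--     (18, 75),    # Juz 16 starts at Surah 18, Ayah 75
--     (21, 1),     # Juz 17 starts at Surah 21, Ayah 1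
--     (23, 1),     # Juz 18 starts at Surah 23, Ayah 1
--     (25, 21),    # Juz 19 starts at Surah 25, Ayah 21
--     (27, 56),    # Juz 20 starts at Surah 27, Ayah 56
--     (29, 46),    # Juz 21 starts at Surah 29, Ayah 46
--     (33, 31),    # Juz 22 starts at Surah 33, Ayah 31
--     (36, 28),    # Juz 23 starts at Surah 36, Ayah 28
--     (39, 32),    # Juz 24 starts at Surah 39, Ayah 32
--     (41, 47),    # Juz 25 starts at Surah 41, Ayah 47
--     (46, 1),     # Juz 26 starts at Surah 46, Ayah 1
--     (51, 31),    # Juz 27 starts at Surah 51, Ayah 31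
--     (58, 1),     # Juz 28 starts at Surah 58, Ayah 1
--     (67, 1),     # Juz 29 starts at Surah 67, Ayah 1
--     (78, 1),     # Juz 30 starts at Surah 78, Ayah 1
-- ]
--
-- def get_juz_for_ayah(surah_number, ayah_number):
--     """Determine which juz (part) a verse belongs to based on its surah and ayah number."""
--     surah_number = int(surah_number)
--     ayah_number = int(ayah_number)
--
--     juz_number = 1  # Default to first juz
--
--     for i, (juz_surah, juz_ayah) in enumerate(JUZ_BOUNDARIES):
--         if (surah_number < juz_surah) or (surah_number == juz_surah and ayah_number < juz_ayah):
--             break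
--         juz_number = i + 1
--
--     return juz_number
-- ===== SOURCE B (Python) =====
-- JUZ_BOUNDARIES = [
--     (1, 1), (2, 142), (2, 253), (3, 92), (4, 24), (4, 148), (5, 82),
--     (6, 111), (7, 88), (8, 41), (9, 93), (11, 6), (12, 53), (15, 1),
--     (17, 1), (18, 75), (21, 1), (23, 1), (25, 21), (27, 56), (29, 46),
--     (33, 31), (36, 28), (39, 32), (41, 47), (46, 1), (51, 31), (58, 1),
--     (67, 1), (78, 1),
-- ]
--
-- def get_juz_for_ayah(surah_number, ayah_number):
--     """Binary search over the sorted boundary table (bisect_right by hand)."""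
--     key = (int(surah_number), int(ayah_number))
--     lo, hi = 0, len(JUZ_BOUNDARIES)
--     while lo < hi:
--         mid = (lo + hi) // 2
--         if key < JUZ_BOUNDARIES[mid]:
--             hi = mid
--         else:
--             lo = mid + 1
--     return max(1, lo)
-- ===== Notes on version B (the rewrite author's own statement) =====
-- stated objective: alternative
-- what changed: Replaces A's sequential scan-and-remember over the 30 Juz boundaries with a hand-written bisect_right binary search over the sorted boundary table, returning max(1, insertion index).
import Mathlib
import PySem

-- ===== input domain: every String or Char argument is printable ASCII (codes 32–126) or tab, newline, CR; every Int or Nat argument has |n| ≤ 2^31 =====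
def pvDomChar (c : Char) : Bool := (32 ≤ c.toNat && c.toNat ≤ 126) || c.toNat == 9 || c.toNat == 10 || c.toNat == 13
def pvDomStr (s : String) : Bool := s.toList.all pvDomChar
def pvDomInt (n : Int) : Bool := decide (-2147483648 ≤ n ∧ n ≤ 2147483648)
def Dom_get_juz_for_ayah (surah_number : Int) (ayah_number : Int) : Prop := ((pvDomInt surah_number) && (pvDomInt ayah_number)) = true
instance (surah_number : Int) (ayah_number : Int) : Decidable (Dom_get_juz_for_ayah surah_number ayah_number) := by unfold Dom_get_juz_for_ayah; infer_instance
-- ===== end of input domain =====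

-- B replaces A's linear scan with a binary search (bisect_right) over the sorted boundary table (objective: alternative).

def pvJUZ : List (Int × Int) :=
  [(1, 1), (2, 142), (2, 253), (3, 92), (4, 24), (4, 148), (5, 82),
   (6, 111), (7, 88), (8, 41), (9, 93), (11, 6), (12, 53), (15, 1),
   (17, 1), (18, 75), (21, 1), (23, 1), (25, 21), (27, 56), (29, 46),
   (33, 31), (36, 28), (39, 32), (41, 47), (46, 1), (51, 31), (58, 1),
   (67, 1), (78, 1)]

-- ===== PORT A =====
-- A's for-loop with break: remembers i+1 for every boundary not past the target, stops at the first one past it.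
def pvJuzLoop (s a : Int) : List (Int × Int) → Nat → Int → Int
  | [], _, juz => juz
  | (js, ja) :: rest, i, juz =>
    if s < js ∨ (s = js ∧ a < ja) then juz
    else pvJuzLoop s a rest (i + 1) (Int.ofNat (i + 1))

def get_juz_for_ayah (surah_number : Int) (ayah_number : Int) : Int :=
  pvJuzLoop surah_number ayah_number pvJUZ 0 1

-- ===== PORT B =====
-- B's while-loop binary search (bisect_right): tuple comparison key < pvJUZ[mid] is lexicographic.
def pvBisect (s a : Int) (lo hi : Nat) : Nat :=
  if lo < hi then
    let mid := (lo + hi) / 2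
    let p := pvJUZ.getD mid (0, 0)
    if s < p.1 ∨ (s = p.1 ∧ a < p.2) then pvBisect s a lo mid
    else pvBisect s a (mid + 1) hi
  else lo
termination_by hi - lo
decreasing_by all_goals omega

def get_juz_for_ayah_alt (surah_number : Int) (ayah_number : Int) : Int :=
  max 1 (Int.ofNat (pvBisect surah_number ayah_number 0 pvJUZ.length))

-- ===== PRECONDITION & SPEC =====
def Spec_get_juz_for_ayah (surah_number : Int) (ayah_number : Int) (out : Int) : Prop := out = get_juz_for_ayah_alt surah_number ayah_number
instance (surah_number : Int) (ayah_number : Int) (out : Int) : Decidable (Spec_get_juz_for_ayah surah_number ayah_number out) := by unfold Spec_get_juz_for_ayah; infer_instance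

-- ===== CLAIM (what is proved, stated in full; the proofs are below) =====
def Claim_equal_get_juz_for_ayah : Prop := ∀ (surah_number : Int) (ayah_number : Int), Dom_get_juz_for_ayah surah_number ayah_number → Spec_get_juz_for_ayah surah_number ayah_number (get_juz_for_ayah surah_number ayah_number)

-- ===== LEMMAS AND PROOFS =====
-- one unfolding lemma per concrete (lo,hi) node the binary search can reach from (0,30)
lemma pvB_0_30 (s a : Int) : pvBisect s a 0 30 = if s < 18 ∨ (s = 18 ∧ a < 75) then pvBisect s a 0 15 else pvBisect s a 16 30 := by
  rw [pvBisect]; norm_num [pvJUZ]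

lemma pvB_0_15 (s a : Int) : pvBisect s a 0 15 = if s < 6 ∨ (s = 6 ∧ a < 111) then pvBisect s a 0 7 else pvBisect s a 8 15 := by
  rw [pvBisect]; norm_num [pvJUZ]

lemma pvB_0_7 (s a : Int) : pvBisect s a 0 7 = if s < 3 ∨ (s = 3 ∧ a < 92) then pvBisect s a 0 3 else pvBisect s a 4 7 := by
  rw [pvBisect]; norm_num [pvJUZ]

lemma pvB_0_3 (s a : Int) : pvBisect s a 0 3 = if s < 2 ∨ (s = 2 ∧ a < 142) then pvBisect s a 0 1 else pvBisect s a 2 3 := by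
  rw [pvBisect]; norm_num [pvJUZ]

lemma pvB_0_1 (s a : Int) : pvBisect s a 0 1 = if s < 1 ∨ (s = 1 ∧ a < 1) then pvBisect s a 0 0 else pvBisect s a 1 1 := by
  rw [pvBisect]; norm_num [pvJUZ]

lemma pvB_2_3 (s a : Int) : pvBisect s a 2 3 = if s < 2 ∨ (s = 2 ∧ a < 253) then pvBisect s a 2 2 else pvBisect s a 3 3 := by
  rw [pvBisect]; norm_num [pvJUZ]

lemma pvB_4_7 (s a : Int) : pvBisect s a 4 7 = if s < 4 ∨ (s = 4 ∧ a < 148) then pvBisect s a 4 5 else pvBisect s a 6 7 := by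
  rw [pvBisect]; norm_num [pvJUZ]

lemma pvB_4_5 (s a : Int) : pvBisect s a 4 5 = if s < 4 ∨ (s = 4 ∧ a < 24) then pvBisect s a 4 4 else pvBisect s a 5 5 := by
  rw [pvBisect]; norm_num [pvJUZ]

lemma pvB_6_7 (s a : Int) : pvBisect s a 6 7 = if s < 5 ∨ (s = 5 ∧ a < 82) then pvBisect s a 6 6 else pvBisect s a 7 7 := by
  rw [pvBisect]; norm_num [pvJUZ]

lemma pvB_8_15 (s a : Int) : pvBisect s a 8 15 = if s < 11 ∨ (s = 11 ∧ a < 6) then pvBisect s a 8 11 else pvBisect s a 12 15 := by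
  rw [pvBisect]; norm_num [pvJUZ]

lemma pvB_8_11 (s a : Int) : pvBisect s a 8 11 = if s < 8 ∨ (s = 8 ∧ a < 41) then pvBisect s a 8 9 else pvBisect s a 10 11 := by
  rw [pvBisect]; norm_num [pvJUZ]

lemma pvB_8_9 (s a : Int) : pvBisect s a 8 9 = if s < 7 ∨ (s = 7 ∧ a < 88) then pvBisect s a 8 8 else pvBisect s a 9 9 := by
  rw [pvBisect]; norm_num [pvJUZ]

lemma pvB_10_11 (s a : Int) : pvBisect s a 10 11 = if s < 9 ∨ (s = 9 ∧ a < 93) then pvBisect s a 10 10 else pvBisect s a 11 11 := by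
  rw [pvBisect]; norm_num [pvJUZ]

lemma pvB_12_15 (s a : Int) : pvBisect s a 12 15 = if s < 15 ∨ (s = 15 ∧ a < 1) then pvBisect s a 12 13 else pvBisect s a 14 15 := by
  rw [pvBisect]; norm_num [pvJUZ]

lemma pvB_12_13 (s a : Int) : pvBisect s a 12 13 = if s < 12 ∨ (s = 12 ∧ a < 53) then pvBisect s a 12 12 else pvBisect s a 13 13 := by
  rw [pvBisect]; norm_num [pvJUZ]

lemma pvB_14_15 (s a : Int) : pvBisect s a 14 15 = if s < 17 ∨ (s = 17 ∧ a < 1) then pvBisect s a 14 14 else pvBisect s a 15 15 := by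
  rw [pvBisect]; norm_num [pvJUZ]

lemma pvB_16_30 (s a : Int) : pvBisect s a 16 30 = if s < 39 ∨ (s = 39 ∧ a < 32) then pvBisect s a 16 23 else pvBisect s a 24 30 := by
  rw [pvBisect]; norm_num [pvJUZ]

lemma pvB_16_23 (s a : Int) : pvBisect s a 16 23 = if s < 27 ∨ (s = 27 ∧ a < 56) then pvBisect s a 16 19 else pvBisect s a 20 23 := by
  rw [pvBisect]; norm_num [pvJUZ]

lemma pvB_16_19 (s a : Int) : pvBisect s a 16 19 = if s < 23 ∨ (s = 23 ∧ a < 1) then pvBisect s a 16 17 else pvBisect s a 18 19 := by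
  rw [pvBisect]; norm_num [pvJUZ]

lemma pvB_16_17 (s a : Int) : pvBisect s a 16 17 = if s < 21 ∨ (s = 21 ∧ a < 1) then pvBisect s a 16 16 else pvBisect s a 17 17 := by
  rw [pvBisect]; norm_num [pvJUZ]

lemma pvB_18_19 (s a : Int) : pvBisect s a 18 19 = if s < 25 ∨ (s = 25 ∧ a < 21) then pvBisect s a 18 18 else pvBisect s a 19 19 := by
  rw [pvBisect]; norm_num [pvJUZ]

lemma pvB_20_23 (s a : Int) : pvBisect s a 20 23 = if s < 33 ∨ (s = 33 ∧ a < 31) then pvBisect s a 20 21 else pvBisect s a 22 23 := by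
  rw [pvBisect]; norm_num [pvJUZ]

lemma pvB_20_21 (s a : Int) : pvBisect s a 20 21 = if s < 29 ∨ (s = 29 ∧ a < 46) then pvBisect s a 20 20 else pvBisect s a 21 21 := by
  rw [pvBisect]; norm_num [pvJUZ]

lemma pvB_22_23 (s a : Int) : pvBisect s a 22 23 = if s < 36 ∨ (s = 36 ∧ a < 28) then pvBisect s a 22 22 else pvBisect s a 23 23 := by
  rw [pvBisect]; norm_num [pvJUZ]

lemma pvB_24_30 (s a : Int) : pvBisect s a 24 30 = if s < 58 ∨ (s = 58 ∧ a < 1) then pvBisect s a 24 27 else pvBisect s a 28 30 := by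
  rw [pvBisect]; norm_num [pvJUZ]

lemma pvB_24_27 (s a : Int) : pvBisect s a 24 27 = if s < 46 ∨ (s = 46 ∧ a < 1) then pvBisect s a 24 25 else pvBisect s a 26 27 := by
  rw [pvBisect]; norm_num [pvJUZ]

lemma pvB_24_25 (s a : Int) : pvBisect s a 24 25 = if s < 41 ∨ (s = 41 ∧ a < 47) then pvBisect s a 24 24 else pvBisect s a 25 25 := by
  rw [pvBisect]; norm_num [pvJUZ]

lemma pvB_26_27 (s a : Int) : pvBisect s a 26 27 = if s < 51 ∨ (s = 51 ∧ a < 31) then pvBisect s a 26 26 else pvBisect s a 27 27 := by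
  rw [pvBisect]; norm_num [pvJUZ]

lemma pvB_28_30 (s a : Int) : pvBisect s a 28 30 = if s < 78 ∨ (s = 78 ∧ a < 1) then pvBisect s a 28 29 else pvBisect s a 30 30 := by
  rw [pvBisect]; norm_num [pvJUZ]

lemma pvB_28_29 (s a : Int) : pvBisect s a 28 29 = if s < 67 ∨ (s = 67 ∧ a < 1) then pvBisect s a 28 28 else pvBisect s a 29 29 := by
  rw [pvBisect]; norm_num [pvJUZ]

lemma pvB_0_0 (s a : Int) : pvBisect s a 0 0 = 0 := by
  rw [pvBisect]; norm_num

lemma pvB_1_1 (s a : Int) : pvBisect s a 1 1 = 1 := by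
  rw [pvBisect]; norm_num

lemma pvB_2_2 (s a : Int) : pvBisect s a 2 2 = 2 := by
  rw [pvBisect]; norm_num

lemma pvB_3_3 (s a : Int) : pvBisect s a 3 3 = 3 := by
  rw [pvBisect]; norm_num

lemma pvB_4_4 (s a : Int) : pvBisect s a 4 4 = 4 := by
  rw [pvBisect]; norm_num

lemma pvB_5_5 (s a : Int) : pvBisect s a 5 5 = 5 := by
  rw [pvBisect]; norm_num

lemma pvB_6_6 (s a : Int) : pvBisect s a 6 6 = 6 := by
  rw [pvBisect]; norm_num

lemma pvB_7_7 (s a : Int) : pvBisect s a 7 7 = 7 := by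
  rw [pvBisect]; norm_num

lemma pvB_8_8 (s a : Int) : pvBisect s a 8 8 = 8 := by
  rw [pvBisect]; norm_num

lemma pvB_9_9 (s a : Int) : pvBisect s a 9 9 = 9 := by
  rw [pvBisect]; norm_num

lemma pvB_10_10 (s a : Int) : pvBisect s a 10 10 = 10 := by
  rw [pvBisect]; norm_num

lemma pvB_11_11 (s a : Int) : pvBisect s a 11 11 = 11 := by
  rw [pvBisect]; norm_num

lemma pvB_12_12 (s a : Int) : pvBisect s a 12 12 = 12 := by
  rw [pvBisect]; norm_num

lemma pvB_13_13 (s a : Int) : pvBisect s a 13 13 = 13 := by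
  rw [pvBisect]; norm_num

lemma pvB_14_14 (s a : Int) : pvBisect s a 14 14 = 14 := by
  rw [pvBisect]; norm_num

lemma pvB_15_15 (s a : Int) : pvBisect s a 15 15 = 15 := by
  rw [pvBisect]; norm_num

lemma pvB_16_16 (s a : Int) : pvBisect s a 16 16 = 16 := by
  rw [pvBisect]; norm_num

lemma pvB_17_17 (s a : Int) : pvBisect s a 17 17 = 17 := by
  rw [pvBisect]; norm_num

lemma pvB_18_18 (s a : Int) : pvBisect s a 18 18 = 18 := by
  rw [pvBisect]; norm_num

lemma pvB_19_19 (s a : Int) : pvBisect s a 19 19 = 19 := by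
  rw [pvBisect]; norm_num

lemma pvB_20_20 (s a : Int) : pvBisect s a 20 20 = 20 := by
  rw [pvBisect]; norm_num

lemma pvB_21_21 (s a : Int) : pvBisect s a 21 21 = 21 := by
  rw [pvBisect]; norm_num

lemma pvB_22_22 (s a : Int) : pvBisect s a 22 22 = 22 := by
  rw [pvBisect]; norm_num

lemma pvB_23_23 (s a : Int) : pvBisect s a 23 23 = 23 := by
  rw [pvBisect]; norm_num

lemma pvB_24_24 (s a : Int) : pvBisect s a 24 24 = 24 := by
  rw [pvBisect]; norm_num

lemma pvB_25_25 (s a : Int) : pvBisect s a 25 25 = 25 := by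
  rw [pvBisect]; norm_num

lemma pvB_26_26 (s a : Int) : pvBisect s a 26 26 = 26 := by
  rw [pvBisect]; norm_num

lemma pvB_27_27 (s a : Int) : pvBisect s a 27 27 = 27 := by
  rw [pvBisect]; norm_num

lemma pvB_28_28 (s a : Int) : pvBisect s a 28 28 = 28 := by
  rw [pvBisect]; norm_num

lemma pvB_29_29 (s a : Int) : pvBisect s a 29 29 = 29 := by
  rw [pvBisect]; norm_num

lemma pvB_30_30 (s a : Int) : pvBisect s a 30 30 = 30 := by
  rw [pvBisect]; norm_num


-- ===== VERDICT (by name: the statement is the Claim_ definition above) =====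
set_option maxHeartbeats 1000000 in
theorem get_juz_for_ayah_spec : Claim_equal_get_juz_for_ayah := by
  intro s a _
  unfold Spec_get_juz_for_ayah get_juz_for_ayah get_juz_for_ayah_alt
  rw [show pvJUZ.length = 30 from rfl]
  simp only [pvJuzLoop, pvJUZ]
  by_cases h0 : s < 1 ∨ (s = 1 ∧ a < 1)
  · rw [if_pos h0]
    rw [pvB_0_30, if_pos (show s < 18 ∨ (s = 18 ∧ a < 75) by omega)]
    rw [pvB_0_15, if_pos (show s < 6 ∨ (s = 6 ∧ a < 111) by omega)]
    rw [pvB_0_7, if_pos (show s < 3 ∨ (s = 3 ∧ a < 92) by omega)]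
    rw [pvB_0_3, if_pos (show s < 2 ∨ (s = 2 ∧ a < 142) by omega)]
    rw [pvB_0_1, if_pos (show s < 1 ∨ (s = 1 ∧ a < 1) by omega)]
    rw [pvB_0_0]
    decide
  rw [if_neg h0]
  by_cases h1 : s < 2 ∨ (s = 2 ∧ a < 142)
  · rw [if_pos h1]
    rw [pvB_0_30, if_pos (show s < 18 ∨ (s = 18 ∧ a < 75) by omega)]
    rw [pvB_0_15, if_pos (show s < 6 ∨ (s = 6 ∧ a < 111) by omega)]
    rw [pvB_0_7, if_pos (show s < 3 ∨ (s = 3 ∧ a < 92) by omega)]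
    rw [pvB_0_3, if_pos (show s < 2 ∨ (s = 2 ∧ a < 142) by omega)]
    rw [pvB_0_1, if_neg (show ¬(s < 1 ∨ (s = 1 ∧ a < 1)) by omega)]
    rw [pvB_1_1]
    decide
  rw [if_neg h1]
  by_cases h2 : s < 2 ∨ (s = 2 ∧ a < 253)
  · rw [if_pos h2]
    rw [pvB_0_30, if_pos (show s < 18 ∨ (s = 18 ∧ a < 75) by omega)]
    rw [pvB_0_15, if_pos (show s < 6 ∨ (s = 6 ∧ a < 111) by omega)]
    rw [pvB_0_7, if_pos (show s < 3 ∨ (s = 3 ∧ a < 92) by omega)]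
    rw [pvB_0_3, if_neg (show ¬(s < 2 ∨ (s = 2 ∧ a < 142)) by omega)]
    rw [pvB_2_3, if_pos (show s < 2 ∨ (s = 2 ∧ a < 253) by omega)]
    rw [pvB_2_2]
    decide
  rw [if_neg h2]
  by_cases h3 : s < 3 ∨ (s = 3 ∧ a < 92)
  · rw [if_pos h3]
    rw [pvB_0_30, if_pos (show s < 18 ∨ (s = 18 ∧ a < 75) by omega)]
    rw [pvB_0_15, if_pos (show s < 6 ∨ (s = 6 ∧ a < 111) by omega)]
    rw [pvB_0_7, if_pos (show s < 3 ∨ (s = 3 ∧ a < 92) by omega)]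
    rw [pvB_0_3, if_neg (show ¬(s < 2 ∨ (s = 2 ∧ a < 142)) by omega)]
    rw [pvB_2_3, if_neg (show ¬(s < 2 ∨ (s = 2 ∧ a < 253)) by omega)]
    rw [pvB_3_3]
    decide
  rw [if_neg h3]
  by_cases h4 : s < 4 ∨ (s = 4 ∧ a < 24)
  · rw [if_pos h4]
    rw [pvB_0_30, if_pos (show s < 18 ∨ (s = 18 ∧ a < 75) by omega)]
    rw [pvB_0_15, if_pos (show s < 6 ∨ (s = 6 ∧ a < 111) by omega)]
    rw [pvB_0_7, if_neg (show ¬(s < 3 ∨ (s = 3 ∧ a < 92)) by omega)]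
    rw [pvB_4_7, if_pos (show s < 4 ∨ (s = 4 ∧ a < 148) by omega)]
    rw [pvB_4_5, if_pos (show s < 4 ∨ (s = 4 ∧ a < 24) by omega)]
    rw [pvB_4_4]
    decide
  rw [if_neg h4]
  by_cases h5 : s < 4 ∨ (s = 4 ∧ a < 148)
  · rw [if_pos h5]
    rw [pvB_0_30, if_pos (show s < 18 ∨ (s = 18 ∧ a < 75) by omega)]
    rw [pvB_0_15, if_pos (show s < 6 ∨ (s = 6 ∧ a < 111) by omega)]
    rw [pvB_0_7, if_neg (show ¬(s < 3 ∨ (s = 3 ∧ a < 92)) by omega)]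
    rw [pvB_4_7, if_pos (show s < 4 ∨ (s = 4 ∧ a < 148) by omega)]
    rw [pvB_4_5, if_neg (show ¬(s < 4 ∨ (s = 4 ∧ a < 24)) by omega)]
    rw [pvB_5_5]
    decide
  rw [if_neg h5]
  by_cases h6 : s < 5 ∨ (s = 5 ∧ a < 82)
  · rw [if_pos h6]
    rw [pvB_0_30, if_pos (show s < 18 ∨ (s = 18 ∧ a < 75) by omega)]
    rw [pvB_0_15, if_pos (show s < 6 ∨ (s = 6 ∧ a < 111) by omega)]
    rw [pvB_0_7, if_neg (show ¬(s < 3 ∨ (s = 3 ∧ a < 92)) by omega)]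
    rw [pvB_4_7, if_neg (show ¬(s < 4 ∨ (s = 4 ∧ a < 148)) by omega)]
    rw [pvB_6_7, if_pos (show s < 5 ∨ (s = 5 ∧ a < 82) by omega)]
    rw [pvB_6_6]
    decide
  rw [if_neg h6]
  by_cases h7 : s < 6 ∨ (s = 6 ∧ a < 111)
  · rw [if_pos h7]
    rw [pvB_0_30, if_pos (show s < 18 ∨ (s = 18 ∧ a < 75) by omega)]
    rw [pvB_0_15, if_pos (show s < 6 ∨ (s = 6 ∧ a < 111) by omega)]
    rw [pvB_0_7, if_neg (show ¬(s < 3 ∨ (s = 3 ∧ a < 92)) by omega)]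
    rw [pvB_4_7, if_neg (show ¬(s < 4 ∨ (s = 4 ∧ a < 148)) by omega)]
    rw [pvB_6_7, if_neg (show ¬(s < 5 ∨ (s = 5 ∧ a < 82)) by omega)]
    rw [pvB_7_7]
    decide
  rw [if_neg h7]
  by_cases h8 : s < 7 ∨ (s = 7 ∧ a < 88)
  · rw [if_pos h8]
    rw [pvB_0_30, if_pos (show s < 18 ∨ (s = 18 ∧ a < 75) by omega)]
    rw [pvB_0_15, if_neg (show ¬(s < 6 ∨ (s = 6 ∧ a < 111)) by omega)]
    rw [pvB_8_15, if_pos (show s < 11 ∨ (s = 11 ∧ a < 6) by omega)]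
    rw [pvB_8_11, if_pos (show s < 8 ∨ (s = 8 ∧ a < 41) by omega)]
    rw [pvB_8_9, if_pos (show s < 7 ∨ (s = 7 ∧ a < 88) by omega)]
    rw [pvB_8_8]
    decide
  rw [if_neg h8]
  by_cases h9 : s < 8 ∨ (s = 8 ∧ a < 41)
  · rw [if_pos h9]
    rw [pvB_0_30, if_pos (show s < 18 ∨ (s = 18 ∧ a < 75) by omega)]
    rw [pvB_0_15, if_neg (show ¬(s < 6 ∨ (s = 6 ∧ a < 111)) by omega)]
    rw [pvB_8_15, if_pos (show s < 11 ∨ (s = 11 ∧ a < 6) by omega)]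
    rw [pvB_8_11, if_pos (show s < 8 ∨ (s = 8 ∧ a < 41) by omega)]
    rw [pvB_8_9, if_neg (show ¬(s < 7 ∨ (s = 7 ∧ a < 88)) by omega)]
    rw [pvB_9_9]
    decide
  rw [if_neg h9]
  by_cases h10 : s < 9 ∨ (s = 9 ∧ a < 93)
  · rw [if_pos h10]
    rw [pvB_0_30, if_pos (show s < 18 ∨ (s = 18 ∧ a < 75) by omega)]
    rw [pvB_0_15, if_neg (show ¬(s < 6 ∨ (s = 6 ∧ a < 111)) by omega)]
    rw [pvB_8_15, if_pos (show s < 11 ∨ (s = 11 ∧ a < 6) by omega)]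
    rw [pvB_8_11, if_neg (show ¬(s < 8 ∨ (s = 8 ∧ a < 41)) by omega)]
    rw [pvB_10_11, if_pos (show s < 9 ∨ (s = 9 ∧ a < 93) by omega)]
    rw [pvB_10_10]
    decide
  rw [if_neg h10]
  by_cases h11 : s < 11 ∨ (s = 11 ∧ a < 6)
  · rw [if_pos h11]
    rw [pvB_0_30, if_pos (show s < 18 ∨ (s = 18 ∧ a < 75) by omega)]
    rw [pvB_0_15, if_neg (show ¬(s < 6 ∨ (s = 6 ∧ a < 111)) by omega)]
    rw [pvB_8_15, if_pos (show s < 11 ∨ (s = 11 ∧ a < 6) by omega)]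
    rw [pvB_8_11, if_neg (show ¬(s < 8 ∨ (s = 8 ∧ a < 41)) by omega)]
    rw [pvB_10_11, if_neg (show ¬(s < 9 ∨ (s = 9 ∧ a < 93)) by omega)]
    rw [pvB_11_11]
    decide
  rw [if_neg h11]
  by_cases h12 : s < 12 ∨ (s = 12 ∧ a < 53)
  · rw [if_pos h12]
    rw [pvB_0_30, if_pos (show s < 18 ∨ (s = 18 ∧ a < 75) by omega)]
    rw [pvB_0_15, if_neg (show ¬(s < 6 ∨ (s = 6 ∧ a < 111)) by omega)]
    rw [pvB_8_15, if_neg (show ¬(s < 11 ∨ (s = 11 ∧ a < 6)) by omega)]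
    rw [pvB_12_15, if_pos (show s < 15 ∨ (s = 15 ∧ a < 1) by omega)]
    rw [pvB_12_13, if_pos (show s < 12 ∨ (s = 12 ∧ a < 53) by omega)]
    rw [pvB_12_12]
    decide
  rw [if_neg h12]
  by_cases h13 : s < 15 ∨ (s = 15 ∧ a < 1)
  · rw [if_pos h13]
    rw [pvB_0_30, if_pos (show s < 18 ∨ (s = 18 ∧ a < 75) by omega)]
    rw [pvB_0_15, if_neg (show ¬(s < 6 ∨ (s = 6 ∧ a < 111)) by omega)]
    rw [pvB_8_15, if_neg (show ¬(s < 11 ∨ (s = 11 ∧ a < 6)) by omega)]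
    rw [pvB_12_15, if_pos (show s < 15 ∨ (s = 15 ∧ a < 1) by omega)]
    rw [pvB_12_13, if_neg (show ¬(s < 12 ∨ (s = 12 ∧ a < 53)) by omega)]
    rw [pvB_13_13]
    decide
  rw [if_neg h13]
  by_cases h14 : s < 17 ∨ (s = 17 ∧ a < 1)
  · rw [if_pos h14]
    rw [pvB_0_30, if_pos (show s < 18 ∨ (s = 18 ∧ a < 75) by omega)]
    rw [pvB_0_15, if_neg (show ¬(s < 6 ∨ (s = 6 ∧ a < 111)) by omega)]
    rw [pvB_8_15, if_neg (show ¬(s < 11 ∨ (s = 11 ∧ a < 6)) by omega)]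
    rw [pvB_12_15, if_neg (show ¬(s < 15 ∨ (s = 15 ∧ a < 1)) by omega)]
    rw [pvB_14_15, if_pos (show s < 17 ∨ (s = 17 ∧ a < 1) by omega)]
    rw [pvB_14_14]
    decide
  rw [if_neg h14]
  by_cases h15 : s < 18 ∨ (s = 18 ∧ a < 75)
  · rw [if_pos h15]
    rw [pvB_0_30, if_pos (show s < 18 ∨ (s = 18 ∧ a < 75) by omega)]
    rw [pvB_0_15, if_neg (show ¬(s < 6 ∨ (s = 6 ∧ a < 111)) by omega)]
    rw [pvB_8_15, if_neg (show ¬(s < 11 ∨ (s = 11 ∧ a < 6)) by omega)]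
    rw [pvB_12_15, if_neg (show ¬(s < 15 ∨ (s = 15 ∧ a < 1)) by omega)]
    rw [pvB_14_15, if_neg (show ¬(s < 17 ∨ (s = 17 ∧ a < 1)) by omega)]
    rw [pvB_15_15]
    decide
  rw [if_neg h15]
  by_cases h16 : s < 21 ∨ (s = 21 ∧ a < 1)
  · rw [if_pos h16]
    rw [pvB_0_30, if_neg (show ¬(s < 18 ∨ (s = 18 ∧ a < 75)) by omega)]
    rw [pvB_16_30, if_pos (show s < 39 ∨ (s = 39 ∧ a < 32) by omega)]
    rw [pvB_16_23, if_pos (show s < 27 ∨ (s = 27 ∧ a < 56) by omega)]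
    rw [pvB_16_19, if_pos (show s < 23 ∨ (s = 23 ∧ a < 1) by omega)]
    rw [pvB_16_17, if_pos (show s < 21 ∨ (s = 21 ∧ a < 1) by omega)]
    rw [pvB_16_16]
    decide
  rw [if_neg h16]
  by_cases h17 : s < 23 ∨ (s = 23 ∧ a < 1)
  · rw [if_pos h17]
    rw [pvB_0_30, if_neg (show ¬(s < 18 ∨ (s = 18 ∧ a < 75)) by omega)]
    rw [pvB_16_30, if_pos (show s < 39 ∨ (s = 39 ∧ a < 32) by omega)]
    rw [pvB_16_23, if_pos (show s < 27 ∨ (s = 27 ∧ a < 56) by omega)]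
    rw [pvB_16_19, if_pos (show s < 23 ∨ (s = 23 ∧ a < 1) by omega)]
    rw [pvB_16_17, if_neg (show ¬(s < 21 ∨ (s = 21 ∧ a < 1)) by omega)]
    rw [pvB_17_17]
    decide
  rw [if_neg h17]
  by_cases h18 : s < 25 ∨ (s = 25 ∧ a < 21)
  · rw [if_pos h18]
    rw [pvB_0_30, if_neg (show ¬(s < 18 ∨ (s = 18 ∧ a < 75)) by omega)]
    rw [pvB_16_30, if_pos (show s < 39 ∨ (s = 39 ∧ a < 32) by omega)]
    rw [pvB_16_23, if_pos (show s < 27 ∨ (s = 27 ∧ a < 56) by omega)]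
    rw [pvB_16_19, if_neg (show ¬(s < 23 ∨ (s = 23 ∧ a < 1)) by omega)]
    rw [pvB_18_19, if_pos (show s < 25 ∨ (s = 25 ∧ a < 21) by omega)]
    rw [pvB_18_18]
    decide
  rw [if_neg h18]
  by_cases h19 : s < 27 ∨ (s = 27 ∧ a < 56)
  · rw [if_pos h19]
    rw [pvB_0_30, if_neg (show ¬(s < 18 ∨ (s = 18 ∧ a < 75)) by omega)]
    rw [pvB_16_30, if_pos (show s < 39 ∨ (s = 39 ∧ a < 32) by omega)]
    rw [pvB_16_23, if_pos (show s < 27 ∨ (s = 27 ∧ a < 56) by omega)]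
    rw [pvB_16_19, if_neg (show ¬(s < 23 ∨ (s = 23 ∧ a < 1)) by omega)]
    rw [pvB_18_19, if_neg (show ¬(s < 25 ∨ (s = 25 ∧ a < 21)) by omega)]
    rw [pvB_19_19]
    decide
  rw [if_neg h19]
  by_cases h20 : s < 29 ∨ (s = 29 ∧ a < 46)
  · rw [if_pos h20]
    rw [pvB_0_30, if_neg (show ¬(s < 18 ∨ (s = 18 ∧ a < 75)) by omega)]
    rw [pvB_16_30, if_pos (show s < 39 ∨ (s = 39 ∧ a < 32) by omega)]
    rw [pvB_16_23, if_neg (show ¬(s < 27 ∨ (s = 27 ∧ a < 56)) by omega)]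
    rw [pvB_20_23, if_pos (show s < 33 ∨ (s = 33 ∧ a < 31) by omega)]
    rw [pvB_20_21, if_pos (show s < 29 ∨ (s = 29 ∧ a < 46) by omega)]
    rw [pvB_20_20]
    decide
  rw [if_neg h20]
  by_cases h21 : s < 33 ∨ (s = 33 ∧ a < 31)
  · rw [if_pos h21]
    rw [pvB_0_30, if_neg (show ¬(s < 18 ∨ (s = 18 ∧ a < 75)) by omega)]
    rw [pvB_16_30, if_pos (show s < 39 ∨ (s = 39 ∧ a < 32) by omega)]
    rw [pvB_16_23, if_neg (show ¬(s < 27 ∨ (s = 27 ∧ a < 56)) by omega)]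
    rw [pvB_20_23, if_pos (show s < 33 ∨ (s = 33 ∧ a < 31) by omega)]
    rw [pvB_20_21, if_neg (show ¬(s < 29 ∨ (s = 29 ∧ a < 46)) by omega)]
    rw [pvB_21_21]
    decide
  rw [if_neg h21]
  by_cases h22 : s < 36 ∨ (s = 36 ∧ a < 28)
  · rw [if_pos h22]
    rw [pvB_0_30, if_neg (show ¬(s < 18 ∨ (s = 18 ∧ a < 75)) by omega)]
    rw [pvB_16_30, if_pos (show s < 39 ∨ (s = 39 ∧ a < 32) by omega)]
    rw [pvB_16_23, if_neg (show ¬(s < 27 ∨ (s = 27 ∧ a < 56)) by omega)]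
    rw [pvB_20_23, if_neg (show ¬(s < 33 ∨ (s = 33 ∧ a < 31)) by omega)]
    rw [pvB_22_23, if_pos (show s < 36 ∨ (s = 36 ∧ a < 28) by omega)]
    rw [pvB_22_22]
    decide
  rw [if_neg h22]
  by_cases h23 : s < 39 ∨ (s = 39 ∧ a < 32)
  · rw [if_pos h23]
    rw [pvB_0_30, if_neg (show ¬(s < 18 ∨ (s = 18 ∧ a < 75)) by omega)]
    rw [pvB_16_30, if_pos (show s < 39 ∨ (s = 39 ∧ a < 32) by omega)]
    rw [pvB_16_23, if_neg (show ¬(s < 27 ∨ (s = 27 ∧ a < 56)) by omega)]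
    rw [pvB_20_23, if_neg (show ¬(s < 33 ∨ (s = 33 ∧ a < 31)) by omega)]
    rw [pvB_22_23, if_neg (show ¬(s < 36 ∨ (s = 36 ∧ a < 28)) by omega)]
    rw [pvB_23_23]
    decide
  rw [if_neg h23]
  by_cases h24 : s < 41 ∨ (s = 41 ∧ a < 47)
  · rw [if_pos h24]
    rw [pvB_0_30, if_neg (show ¬(s < 18 ∨ (s = 18 ∧ a < 75)) by omega)]
    rw [pvB_16_30, if_neg (show ¬(s < 39 ∨ (s = 39 ∧ a < 32)) by omega)]
    rw [pvB_24_30, if_pos (show s < 58 ∨ (s = 58 ∧ a < 1) by omega)]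
    rw [pvB_24_27, if_pos (show s < 46 ∨ (s = 46 ∧ a < 1) by omega)]
    rw [pvB_24_25, if_pos (show s < 41 ∨ (s = 41 ∧ a < 47) by omega)]
    rw [pvB_24_24]
    decide
  rw [if_neg h24]
  by_cases h25 : s < 46 ∨ (s = 46 ∧ a < 1)
  · rw [if_pos h25]
    rw [pvB_0_30, if_neg (show ¬(s < 18 ∨ (s = 18 ∧ a < 75)) by omega)]
    rw [pvB_16_30, if_neg (show ¬(s < 39 ∨ (s = 39 ∧ a < 32)) by omega)]
    rw [pvB_24_30, if_pos (show s < 58 ∨ (s = 58 ∧ a < 1) by omega)]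
    rw [pvB_24_27, if_pos (show s < 46 ∨ (s = 46 ∧ a < 1) by omega)]
    rw [pvB_24_25, if_neg (show ¬(s < 41 ∨ (s = 41 ∧ a < 47)) by omega)]
    rw [pvB_25_25]
    decide
  rw [if_neg h25]
  by_cases h26 : s < 51 ∨ (s = 51 ∧ a < 31)
  · rw [if_pos h26]
    rw [pvB_0_30, if_neg (show ¬(s < 18 ∨ (s = 18 ∧ a < 75)) by omega)]
    rw [pvB_16_30, if_neg (show ¬(s < 39 ∨ (s = 39 ∧ a < 32)) by omega)]
    rw [pvB_24_30, if_pos (show s < 58 ∨ (s = 58 ∧ a < 1) by omega)]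
    rw [pvB_24_27, if_neg (show ¬(s < 46 ∨ (s = 46 ∧ a < 1)) by omega)]
    rw [pvB_26_27, if_pos (show s < 51 ∨ (s = 51 ∧ a < 31) by omega)]
    rw [pvB_26_26]
    decide
  rw [if_neg h26]
  by_cases h27 : s < 58 ∨ (s = 58 ∧ a < 1)
  · rw [if_pos h27]
    rw [pvB_0_30, if_neg (show ¬(s < 18 ∨ (s = 18 ∧ a < 75)) by omega)]
    rw [pvB_16_30, if_neg (show ¬(s < 39 ∨ (s = 39 ∧ a < 32)) by omega)]
    rw [pvB_24_30, if_pos (show s < 58 ∨ (s = 58 ∧ a < 1) by omega)]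
    rw [pvB_24_27, if_neg (show ¬(s < 46 ∨ (s = 46 ∧ a < 1)) by omega)]
    rw [pvB_26_27, if_neg (show ¬(s < 51 ∨ (s = 51 ∧ a < 31)) by omega)]
    rw [pvB_27_27]
    decide
  rw [if_neg h27]
  by_cases h28 : s < 67 ∨ (s = 67 ∧ a < 1)
  · rw [if_pos h28]
    rw [pvB_0_30, if_neg (show ¬(s < 18 ∨ (s = 18 ∧ a < 75)) by omega)]
    rw [pvB_16_30, if_neg (show ¬(s < 39 ∨ (s = 39 ∧ a < 32)) by omega)]
    rw [pvB_24_30, if_neg (show ¬(s < 58 ∨ (s = 58 ∧ a < 1)) by omega)]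
    rw [pvB_28_30, if_pos (show s < 78 ∨ (s = 78 ∧ a < 1) by omega)]
    rw [pvB_28_29, if_pos (show s < 67 ∨ (s = 67 ∧ a < 1) by omega)]
    rw [pvB_28_28]
    decide
  rw [if_neg h28]
  by_cases h29 : s < 78 ∨ (s = 78 ∧ a < 1)
  · rw [if_pos h29]
    rw [pvB_0_30, if_neg (show ¬(s < 18 ∨ (s = 18 ∧ a < 75)) by omega)]
    rw [pvB_16_30, if_neg (show ¬(s < 39 ∨ (s = 39 ∧ a < 32)) by omega)]
    rw [pvB_24_30, if_neg (show ¬(s < 58 ∨ (s = 58 ∧ a < 1)) by omega)]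
    rw [pvB_28_30, if_pos (show s < 78 ∨ (s = 78 ∧ a < 1) by omega)]
    rw [pvB_28_29, if_neg (show ¬(s < 67 ∨ (s = 67 ∧ a < 1)) by omega)]
    rw [pvB_29_29]
    decide
  rw [if_neg h29]
  rw [pvB_0_30, if_neg (show ¬(s < 18 ∨ (s = 18 ∧ a < 75)) by omega)]
  rw [pvB_16_30, if_neg (show ¬(s < 39 ∨ (s = 39 ∧ a < 32)) by omega)]
  rw [pvB_24_30, if_neg (show ¬(s < 58 ∨ (s = 58 ∧ a < 1)) by omega)]
  rw [pvB_28_30, if_neg (show ¬(s < 78 ∨ (s = 78 ∧ a < 1)) by omega)]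
  rw [pvB_30_30]
  decide
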